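-- pv_equiv track=rewrite | github.com/harborsuits/BensPaperTradingBot | scripts/contextual_demo.py | _get_risk_percentage
-- ===== SOURCE A (Python) =====
-- def _get_risk_percentage(account_balance):
--     """
--     Implements the progressive risk scaling strategy:
--     - Up to $500: risk 95% of account
--     - $1,000: 90%
--     - $2,500: 85%
--     - $5,000: 80%
--     - $7,000: 75%
--     - $10,000: 65%
--     - $15,000: 55%
--     - $20,000: 45%
--     - $24,999: 35%
--     - $25,000 (PDT threshold): drop to 15%
--     - $35,000: 12%
--     - $50,000: 10%
--     - $100,000: 8%
--     - $250,000: 6%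
--     - $500,000: 4%
--     - $1M: 2%
--     """
--     # Dictionary of balance thresholds and corresponding risk percentages
--     risk_schedule = {
--         500: 95,
--         1000: 90,
--         2500: 85,
--         5000: 80,
--         7000: 75,
--         10000: 65,
--         15000: 55,
--         20000: 45,
--         24999: 35,
--         25000: 15,  # Sharp drop at PDT threshold
--         35000: 12,
--         50000: 10,
--         100000: 8,
--         250000: 6,
--         500000: 4,
--         1000000: 2
--     }
--
--     # Find the appropriate risk percentage based on the account balance
--     risk_percentage = 2  # Default to lowest risk
--
--     for threshold in sorted(risk_schedule.keys()):
--         if account_balance <= threshold: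
--             risk_percentage = risk_schedule[threshold]
--             break
--
--     return risk_percentage
-- ===== SOURCE B (Python) =====
-- import bisect
--
-- _THRESHOLDS = [500, 1000, 2500, 5000, 7000, 10000, 15000, 20000, 24999,
--                25000, 35000, 50000, 100000, 250000, 500000, 1000000]
-- _RISKS = [95, 90, 85, 80, 75, 65, 55, 45, 35, 15, 12, 10, 8, 6, 4, 2]
--
-- def _get_risk_percentage(account_balance):
--     i = bisect.bisect_left(_THRESHOLDS, account_balance)
--     return _RISKS[i] if i < len(_THRESHOLDS) else 2
-- ===== Notes on version B (the rewrite author's own statement) =====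
-- stated objective: idiomatic
-- what changed: Replaces the sorted-dict linear early-break scan with a precomputed sorted threshold table looked up by bisect_left binary search (default 2 above the top threshold).
import Mathlib
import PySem

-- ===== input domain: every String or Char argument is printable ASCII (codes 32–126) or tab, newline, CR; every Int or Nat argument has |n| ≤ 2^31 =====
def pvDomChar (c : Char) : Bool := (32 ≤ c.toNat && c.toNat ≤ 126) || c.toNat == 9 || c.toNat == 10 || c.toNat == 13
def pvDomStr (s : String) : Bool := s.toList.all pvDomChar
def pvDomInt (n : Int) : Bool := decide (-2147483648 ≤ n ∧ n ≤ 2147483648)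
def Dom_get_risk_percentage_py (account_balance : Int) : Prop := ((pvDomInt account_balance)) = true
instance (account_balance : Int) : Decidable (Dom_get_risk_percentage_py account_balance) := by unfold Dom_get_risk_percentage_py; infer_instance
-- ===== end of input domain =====

-- B replaces A's linear early-break scan over the sorted dict keys with a precomputed
-- sorted threshold/risk table looked up by bisect_left binary search (same result).

-- ===== PORT A =====
-- the risk_schedule dict, in Python insertion order
def pvScheduleA : PySem.Dict Int Int := PySem.Dict.mk
  [(500, 95), (1000, 90), (2500, 85), (5000, 80), (7000, 75), (10000, 65),
   (15000, 55), (20000, 45), (24999, 35), (25000, 15), (35000, 12), (50000, 10),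
   (100000, 8), (250000, 6), (500000, 4), (1000000, 2)]

-- the for-loop with break: the first threshold with balance ≤ threshold wins, else the default 2 stands.
-- Python's risk_schedule[threshold] cannot raise (threshold is one of the dict's own keys), so getD is exact here.
def pvScanA (ts : List Int) (bal : Int) (risk : Int) : Int :=
  match ts with
  | [] => risk
  | t :: rest => if bal ≤ t then PySem.Dict.getD pvScheduleA t risk else pvScanA rest bal risk

def get_risk_percentage_py (account_balance : Int) : Int :=
  pvScanA (PySem.List.sorted (PySem.Dict.keys pvScheduleA) id) account_balance 2

-- ===== PORT B =====
def pvThresholdsB : List Int :=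
  [500, 1000, 2500, 5000, 7000, 10000, 15000, 20000, 24999,
   25000, 35000, 50000, 100000, 250000, 500000, 1000000]
def pvRisksB : List Int := [95, 90, 85, 80, 75, 65, 55, 45, 35, 15, 12, 10, 8, 6, 4, 2]

def get_risk_percentage_py_alt (account_balance : Int) : Int :=
  let i := PySem.List.bisectLeft pvThresholdsB account_balance
  -- _RISKS[i] cannot raise: bisect_left returns 0 ≤ i ≤ len, and it is guarded by i < len, so List.getD is exact
  if i < pvThresholdsB.length then pvRisksB.getD i 0 else 2

-- ===== PRECONDITION & SPEC =====
def Spec_get_risk_percentage_py (account_balance : Int) (out : Int) : Prop := out = get_risk_percentage_py_alt account_balance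
instance (account_balance : Int) (out : Int) : Decidable (Spec_get_risk_percentage_py account_balance out) := by unfold Spec_get_risk_percentage_py; infer_instance

-- ===== CLAIM (what is proved, stated in full; the proofs are below) =====
def Claim_equal_get_risk_percentage_py : Prop := ∀ (account_balance : Int), Dom_get_risk_percentage_py account_balance → Spec_get_risk_percentage_py account_balance (get_risk_percentage_py account_balance)

-- ===== LEMMAS AND PROOFS =====

-- the common closed form both ports are reduced to
def pvTable (bal : Int) : Int :=
  if bal ≤ 500 then 95
  else if bal ≤ 1000 then 90
  else if bal ≤ 2500 then 85
  else if bal ≤ 5000 then 80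
  else if bal ≤ 7000 then 75
  else if bal ≤ 10000 then 65
  else if bal ≤ 15000 then 55
  else if bal ≤ 20000 then 45
  else if bal ≤ 24999 then 35
  else if bal ≤ 25000 then 15
  else if bal ≤ 35000 then 12
  else if bal ≤ 50000 then 10
  else if bal ≤ 100000 then 8
  else if bal ≤ 250000 then 6
  else if bal ≤ 500000 then 4
  else if bal ≤ 1000000 then 2
  else 2

theorem pvSortedKeys :
    PySem.List.sorted (PySem.Dict.keys pvScheduleA) id = pvThresholdsB := by decide

theorem pvA_eval (bal : Int) : get_risk_percentage_py bal = pvTable bal := by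
  unfold get_risk_percentage_py
  rw [pvSortedKeys]
  norm_num [pvScanA, pvThresholdsB, pvScheduleA, pvTable, PySem.Dict.getD, PySem.Dict.get?]

theorem pvB_eval (bal : Int) : get_risk_percentage_py_alt bal = pvTable bal := by
  unfold get_risk_percentage_py_alt pvTable
  obtain ⟨hle, hlt, hge⟩ := PySem.List.bisectLeft_spec pvThresholdsB bal (by decide)
  have hlen : pvThresholdsB.length = 16 := by decide
  rw [hlen] at hle
  have H0 : (0 < PySem.List.bisectLeft pvThresholdsB bal → (500:Int) < bal) ∧ (PySem.List.bisectLeft pvThresholdsB bal ≤ 0 → bal ≤ 500) := ⟨hlt 0 (by decide), hge 0 (by decide)⟩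
  have H1 : (1 < PySem.List.bisectLeft pvThresholdsB bal → (1000:Int) < bal) ∧ (PySem.List.bisectLeft pvThresholdsB bal ≤ 1 → bal ≤ 1000) := ⟨hlt 1 (by decide), hge 1 (by decide)⟩
  have H2 : (2 < PySem.List.bisectLeft pvThresholdsB bal → (2500:Int) < bal) ∧ (PySem.List.bisectLeft pvThresholdsB bal ≤ 2 → bal ≤ 2500) := ⟨hlt 2 (by decide), hge 2 (by decide)⟩
  have H3 : (3 < PySem.List.bisectLeft pvThresholdsB bal → (5000:Int) < bal) ∧ (PySem.List.bisectLeft pvThresholdsB bal ≤ 3 → bal ≤ 5000) := ⟨hlt 3 (by decide), hge 3 (by decide)⟩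
  have H4 : (4 < PySem.List.bisectLeft pvThresholdsB bal → (7000:Int) < bal) ∧ (PySem.List.bisectLeft pvThresholdsB bal ≤ 4 → bal ≤ 7000) := ⟨hlt 4 (by decide), hge 4 (by decide)⟩
  have H5 : (5 < PySem.List.bisectLeft pvThresholdsB bal → (10000:Int) < bal) ∧ (PySem.List.bisectLeft pvThresholdsB bal ≤ 5 → bal ≤ 10000) := ⟨hlt 5 (by decide), hge 5 (by decide)⟩
  have H6 : (6 < PySem.List.bisectLeft pvThresholdsB bal → (15000:Int) < bal) ∧ (PySem.List.bisectLeft pvThresholdsB bal ≤ 6 → bal ≤ 15000) := ⟨hlt 6 (by decide), hge 6 (by decide)⟩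
  have H7 : (7 < PySem.List.bisectLeft pvThresholdsB bal → (20000:Int) < bal) ∧ (PySem.List.bisectLeft pvThresholdsB bal ≤ 7 → bal ≤ 20000) := ⟨hlt 7 (by decide), hge 7 (by decide)⟩
  have H8 : (8 < PySem.List.bisectLeft pvThresholdsB bal → (24999:Int) < bal) ∧ (PySem.List.bisectLeft pvThresholdsB bal ≤ 8 → bal ≤ 24999) := ⟨hlt 8 (by decide), hge 8 (by decide)⟩
  have H9 : (9 < PySem.List.bisectLeft pvThresholdsB bal → (25000:Int) < bal) ∧ (PySem.List.bisectLeft pvThresholdsB bal ≤ 9 → bal ≤ 25000) := ⟨hlt 9 (by decide), hge 9 (by decide)⟩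
  have H10 : (10 < PySem.List.bisectLeft pvThresholdsB bal → (35000:Int) < bal) ∧ (PySem.List.bisectLeft pvThresholdsB bal ≤ 10 → bal ≤ 35000) := ⟨hlt 10 (by decide), hge 10 (by decide)⟩
  have H11 : (11 < PySem.List.bisectLeft pvThresholdsB bal → (50000:Int) < bal) ∧ (PySem.List.bisectLeft pvThresholdsB bal ≤ 11 → bal ≤ 50000) := ⟨hlt 11 (by decide), hge 11 (by decide)⟩
  have H12 : (12 < PySem.List.bisectLeft pvThresholdsB bal → (100000:Int) < bal) ∧ (PySem.List.bisectLeft pvThresholdsB bal ≤ 12 → bal ≤ 100000) := ⟨hlt 12 (by decide), hge 12 (by decide)⟩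
  have H13 : (13 < PySem.List.bisectLeft pvThresholdsB bal → (250000:Int) < bal) ∧ (PySem.List.bisectLeft pvThresholdsB bal ≤ 13 → bal ≤ 250000) := ⟨hlt 13 (by decide), hge 13 (by decide)⟩
  have H14 : (14 < PySem.List.bisectLeft pvThresholdsB bal → (500000:Int) < bal) ∧ (PySem.List.bisectLeft pvThresholdsB bal ≤ 14 → bal ≤ 500000) := ⟨hlt 14 (by decide), hge 14 (by decide)⟩
  have H15 : (15 < PySem.List.bisectLeft pvThresholdsB bal → (1000000:Int) < bal) ∧ (PySem.List.bisectLeft pvThresholdsB bal ≤ 15 → bal ≤ 1000000) := ⟨hlt 15 (by decide), hge 15 (by decide)⟩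
  clear hlt hge
  show (if (PySem.List.bisectLeft pvThresholdsB bal) < pvThresholdsB.length then pvRisksB.getD (PySem.List.bisectLeft pvThresholdsB bal) 0 else 2) = _
  generalize hgen : PySem.List.bisectLeft pvThresholdsB bal = i at hle H0 H1 H2 H3 H4 H5 H6 H7 H8 H9 H10 H11 H12 H13 H14 H15 ⊢
  clear hgen
  by_cases c0 : bal ≤ 500
  · have e : i = 0 := by omega
    subst e
    rw [if_pos (by decide), show (pvRisksB.getD 0 0 : Int) = 95 from by decide]
    rw [if_pos (by omega)]
  by_cases c1 : bal ≤ 1000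
  · have e : i = 1 := by omega
    subst e
    rw [if_pos (by decide), show (pvRisksB.getD 1 0 : Int) = 90 from by decide]
    rw [if_neg (by omega)]
    rw [if_pos (by omega)]
  by_cases c2 : bal ≤ 2500
  · have e : i = 2 := by omega
    subst e
    rw [if_pos (by decide), show (pvRisksB.getD 2 0 : Int) = 85 from by decide]
    rw [if_neg (by omega)]
    rw [if_neg (by omega)]
    rw [if_pos (by omega)]
  by_cases c3 : bal ≤ 5000
  · have e : i = 3 := by omega
    subst e
    rw [if_pos (by decide), show (pvRisksB.getD 3 0 : Int) = 80 from by decide]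
    rw [if_neg (by omega)]
    rw [if_neg (by omega)]
    rw [if_neg (by omega)]
    rw [if_pos (by omega)]
  by_cases c4 : bal ≤ 7000
  · have e : i = 4 := by omega
    subst e
    rw [if_pos (by decide), show (pvRisksB.getD 4 0 : Int) = 75 from by decide]
    rw [if_neg (by omega)]
    rw [if_neg (by omega)]
    rw [if_neg (by omega)]
    rw [if_neg (by omega)]
    rw [if_pos (by omega)]
  by_cases c5 : bal ≤ 10000
  · have e : i = 5 := by omega
    subst e
    rw [if_pos (by decide), show (pvRisksB.getD 5 0 : Int) = 65 from by decide]
    rw [if_neg (by omega)]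
    rw [if_neg (by omega)]
    rw [if_neg (by omega)]
    rw [if_neg (by omega)]
    rw [if_neg (by omega)]
    rw [if_pos (by omega)]
  by_cases c6 : bal ≤ 15000
  · have e : i = 6 := by omega
    subst e
    rw [if_pos (by decide), show (pvRisksB.getD 6 0 : Int) = 55 from by decide]
    rw [if_neg (by omega)]
    rw [if_neg (by omega)]
    rw [if_neg (by omega)]
    rw [if_neg (by omega)]
    rw [if_neg (by omega)]
    rw [if_neg (by omega)]
    rw [if_pos (by omega)]
  by_cases c7 : bal ≤ 20000
  · have e : i = 7 := by omega
    subst e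
    rw [if_pos (by decide), show (pvRisksB.getD 7 0 : Int) = 45 from by decide]
    rw [if_neg (by omega)]
    rw [if_neg (by omega)]
    rw [if_neg (by omega)]
    rw [if_neg (by omega)]
    rw [if_neg (by omega)]
    rw [if_neg (by omega)]
    rw [if_neg (by omega)]
    rw [if_pos (by omega)]
  by_cases c8 : bal ≤ 24999
  · have e : i = 8 := by omega
    subst e
    rw [if_pos (by decide), show (pvRisksB.getD 8 0 : Int) = 35 from by decide]
    rw [if_neg (by omega)]
    rw [if_neg (by omega)]
    rw [if_neg (by omega)]
    rw [if_neg (by omega)]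
    rw [if_neg (by omega)]
    rw [if_neg (by omega)]
    rw [if_neg (by omega)]
    rw [if_neg (by omega)]
    rw [if_pos (by omega)]
  by_cases c9 : bal ≤ 25000
  · have e : i = 9 := by omega
    subst e
    rw [if_pos (by decide), show (pvRisksB.getD 9 0 : Int) = 15 from by decide]
    rw [if_neg (by omega)]
    rw [if_neg (by omega)]
    rw [if_neg (by omega)]
    rw [if_neg (by omega)]
    rw [if_neg (by omega)]
    rw [if_neg (by omega)]
    rw [if_neg (by omega)]
    rw [if_neg (by omega)]
    rw [if_neg (by omega)]
    rw [if_pos (by omega)]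
  by_cases c10 : bal ≤ 35000
  · have e : i = 10 := by omega
    subst e
    rw [if_pos (by decide), show (pvRisksB.getD 10 0 : Int) = 12 from by decide]
    rw [if_neg (by omega)]
    rw [if_neg (by omega)]
    rw [if_neg (by omega)]
    rw [if_neg (by omega)]
    rw [if_neg (by omega)]
    rw [if_neg (by omega)]
    rw [if_neg (by omega)]
    rw [if_neg (by omega)]
    rw [if_neg (by omega)]
    rw [if_neg (by omega)]
    rw [if_pos (by omega)]
  by_cases c11 : bal ≤ 50000
  · have e : i = 11 := by omega
    subst e
    rw [if_pos (by decide), show (pvRisksB.getD 11 0 : Int) = 10 from by decide]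
    rw [if_neg (by omega)]
    rw [if_neg (by omega)]
    rw [if_neg (by omega)]
    rw [if_neg (by omega)]
    rw [if_neg (by omega)]
    rw [if_neg (by omega)]
    rw [if_neg (by omega)]
    rw [if_neg (by omega)]
    rw [if_neg (by omega)]
    rw [if_neg (by omega)]
    rw [if_neg (by omega)]
    rw [if_pos (by omega)]
  by_cases c12 : bal ≤ 100000
  · have e : i = 12 := by omega
    subst e
    rw [if_pos (by decide), show (pvRisksB.getD 12 0 : Int) = 8 from by decide]
    rw [if_neg (by omega)]
    rw [if_neg (by omega)]
    rw [if_neg (by omega)]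
    rw [if_neg (by omega)]
    rw [if_neg (by omega)]
    rw [if_neg (by omega)]
    rw [if_neg (by omega)]
    rw [if_neg (by omega)]
    rw [if_neg (by omega)]
    rw [if_neg (by omega)]
    rw [if_neg (by omega)]
    rw [if_neg (by omega)]
    rw [if_pos (by omega)]
  by_cases c13 : bal ≤ 250000
  · have e : i = 13 := by omega
    subst e
    rw [if_pos (by decide), show (pvRisksB.getD 13 0 : Int) = 6 from by decide]
    rw [if_neg (by omega)]
    rw [if_neg (by omega)]
    rw [if_neg (by omega)]
    rw [if_neg (by omega)]
    rw [if_neg (by omega)]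
    rw [if_neg (by omega)]
    rw [if_neg (by omega)]
    rw [if_neg (by omega)]
    rw [if_neg (by omega)]
    rw [if_neg (by omega)]
    rw [if_neg (by omega)]
    rw [if_neg (by omega)]
    rw [if_neg (by omega)]
    rw [if_pos (by omega)]
  by_cases c14 : bal ≤ 500000
  · have e : i = 14 := by omega
    subst e
    rw [if_pos (by decide), show (pvRisksB.getD 14 0 : Int) = 4 from by decide]
    rw [if_neg (by omega)]
    rw [if_neg (by omega)]
    rw [if_neg (by omega)]
    rw [if_neg (by omega)]
    rw [if_neg (by omega)]
    rw [if_neg (by omega)]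
    rw [if_neg (by omega)]
    rw [if_neg (by omega)]
    rw [if_neg (by omega)]
    rw [if_neg (by omega)]
    rw [if_neg (by omega)]
    rw [if_neg (by omega)]
    rw [if_neg (by omega)]
    rw [if_neg (by omega)]
    rw [if_pos (by omega)]
  by_cases c15 : bal ≤ 1000000
  · have e : i = 15 := by omega
    subst e
    rw [if_pos (by decide), show (pvRisksB.getD 15 0 : Int) = 2 from by decide]
    rw [if_neg (by omega)]
    rw [if_neg (by omega)]
    rw [if_neg (by omega)]
    rw [if_neg (by omega)]
    rw [if_neg (by omega)]
    rw [if_neg (by omega)]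
    rw [if_neg (by omega)]
    rw [if_neg (by omega)]
    rw [if_neg (by omega)]
    rw [if_neg (by omega)]
    rw [if_neg (by omega)]
    rw [if_neg (by omega)]
    rw [if_neg (by omega)]
    rw [if_neg (by omega)]
    rw [if_neg (by omega)]
    rw [if_pos (by omega)]
  have e : i = 16 := by omega
  subst e
  rw [if_neg (by decide)]
  rw [if_neg (by omega)]
  rw [if_neg (by omega)]
  rw [if_neg (by omega)]
  rw [if_neg (by omega)]
  rw [if_neg (by omega)]
  rw [if_neg (by omega)]
  rw [if_neg (by omega)]
  rw [if_neg (by omega)]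
  rw [if_neg (by omega)]
  rw [if_neg (by omega)]
  rw [if_neg (by omega)]
  rw [if_neg (by omega)]
  rw [if_neg (by omega)]
  rw [if_neg (by omega)]
  rw [if_neg (by omega)]
  rw [if_neg (by omega)]

-- ===== VERDICT (by name: the statement is the Claim_ definition above) =====
theorem get_risk_percentage_py_spec : Claim_equal_get_risk_percentage_py := by
  intro bal _
  unfold Spec_get_risk_percentage_py
  rw [pvA_eval, pvB_eval]
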